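-- pv_equiv track=rewrite | github.com/han-gaeul/TIL | Programmers/Lv.1/부족한금액계산하기.py | solution
-- ===== SOURCE A (Python) =====
-- def solution(price, money, count):
--     for i in range(1, count + 1):
--         money -= price * i
--     if money < 0:
--         return abs(money)
--     else:
--         money = 0
--     return money
-- ===== SOURCE B (Python) =====
-- def solution(price, money, count):
--     n = count if count > 0 else 0
--     need = price * n * (n + 1) // 2
--     shortfall = need - money
--     return shortfall if shortfall > 0 else 0
-- ===== Notes on version B (the rewrite author's own statement) =====
-- stated objective: faster
-- what changed: Replaced the O(count) loop subtracting price*i with the arithmetic-series closed form price*n*(n+1)//2 and a max-with-0.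
import Mathlib
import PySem

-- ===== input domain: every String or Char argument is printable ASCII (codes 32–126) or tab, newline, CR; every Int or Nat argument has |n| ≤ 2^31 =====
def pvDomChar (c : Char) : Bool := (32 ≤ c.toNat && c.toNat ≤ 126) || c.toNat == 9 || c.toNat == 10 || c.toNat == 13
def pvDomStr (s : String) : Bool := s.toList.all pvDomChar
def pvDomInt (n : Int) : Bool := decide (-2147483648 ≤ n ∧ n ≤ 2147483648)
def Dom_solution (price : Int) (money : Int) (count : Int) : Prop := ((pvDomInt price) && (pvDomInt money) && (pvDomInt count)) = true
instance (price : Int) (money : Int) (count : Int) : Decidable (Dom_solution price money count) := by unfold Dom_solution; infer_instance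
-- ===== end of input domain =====

-- B replaces A's O(count) subtraction loop by the arithmetic-series closed form (O(1)).

-- ===== PORT A =====
def solution (price : Int) (money : Int) (count : Int) : Int :=
  let money := (PySem.List.pyRange 1 (count + 1) 1).foldl (fun m i => m - price * i) money
  if money < 0 then |money| else 0

-- ===== PORT B =====
def solution_alt (price : Int) (money : Int) (count : Int) : Int :=
  let n : Int := if count > 0 then count else 0
  let need := PySem.Int.floordiv (price * n * (n + 1)) 2
  let shortfall := need - money
  if shortfall > 0 then shortfall else 0

-- ===== PRECONDITION & SPEC =====
def Spec_solution (price : Int) (money : Int) (count : Int) (out : Int) : Prop := out = solution_alt price money count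
instance (price : Int) (money : Int) (count : Int) (out : Int) : Decidable (Spec_solution price money count out) := by unfold Spec_solution; infer_instance

-- ===== CLAIM (what is proved, stated in full; the proofs are below) =====
def Claim_equal_solution : Prop := ∀ (price : Int) (money : Int) (count : Int), Dom_solution price money count → Spec_solution price money count (solution price money count)

-- ===== LEMMAS AND PROOFS =====

-- the loop subtracts price * (1 + 2 + … + k)
theorem pv_fold_sum (price : Int) (k : Nat) : ∀ (m : Int),
    (PySem.List.pyRange 1 ((k : Int) + 1) 1).foldl (fun m i => m - price * i) m
      = m - price * ((k : Int) * ((k : Int) + 1) / 2) := by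
  induction k with
  | zero => intro m; simp [PySem.List.pyRange_one_eq_nil]
  | succ k ih =>
    intro m
    have h : PySem.List.pyRange 1 (((k : Nat) + 1 : Int) + 1) 1
        = PySem.List.pyRange 1 ((k : Int) + 1) 1 ++ [(k : Int) + 1] := by
      have := PySem.List.pyRange_one_succ_right (a := 1) (b := (k : Int) + 1) (by omega)
      simpa using this
    push_cast
    rw [h, List.foldl_append, ih]
    simp only [List.foldl]
    have hk : ((k : Int) + 1) * ((k : Int) + 1 + 1) / 2 = (k : Int) * ((k : Int) + 1) / 2 + ((k : Int) + 1) := by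
      obtain ⟨t, ht⟩ := Int.even_mul_succ_self (k : Int)
      have h2 : (k : Int) * ((k : Int) + 1) = 2 * t := by omega
      have h3 : ((k : Int) + 1) * ((k : Int) + 1 + 1) = 2 * (t + (k : Int) + 1) := by
        have he : ((k : Int) + 1) * ((k : Int) + 1 + 1) = (k : Int) * ((k : Int) + 1) + 2 * ((k : Int) + 1) := by ring
        omega
      rw [h2, h3, Int.mul_ediv_cancel_left _ (by norm_num), Int.mul_ediv_cancel_left _ (by norm_num)]
      ring
    rw [hk]; ring

theorem pv_need_eq (price : Int) (n : Int) (_hn : 0 ≤ n) :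
    PySem.Int.floordiv (price * n * (n + 1)) 2 = price * (n * (n + 1) / 2) := by
  rw [PySem.Int.floordiv_eq_ediv_of_pos (by norm_num)]
  obtain ⟨t, ht⟩ := Int.even_mul_succ_self n
  have h2 : n * (n + 1) = 2 * t := by omega
  rw [mul_assoc, h2, ← mul_assoc]
  have he : price * 2 * t = 2 * (price * t) := by ring
  rw [he, Int.mul_ediv_cancel_left _ (by norm_num), Int.mul_ediv_cancel_left _ (by norm_num)]

-- ===== VERDICT (by name: the statement is the Claim_ definition above) =====
theorem solution_spec : Claim_equal_solution := by
  intro price money count _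
  unfold Spec_solution solution solution_alt
  by_cases hc : count > 0
  · have hk : count = ((count.toNat : Nat) : Int) := by omega
    simp only [hc, if_pos]
    rw [pv_need_eq price count (by omega)]
    conv_lhs => rw [hk]
    rw [pv_fold_sum]
    rw [← hk]
    set s := price * (count * (count + 1) / 2) with hs
    by_cases h : money - s < 0
    · simp [h, abs_of_neg h]; omega
    · simp [h]; omega
  · have hnil : PySem.List.pyRange 1 (count + 1) 1 = [] :=
      PySem.List.pyRange_one_eq_nil (by omega)
    simp only [hnil, List.foldl_nil, if_neg hc]
    rw [pv_need_eq price 0 (by omega)]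
    by_cases h : money < 0
    · simp only [if_pos h, abs_of_neg h]
      norm_num
      omega
    · simp only [if_neg h]
      norm_num
      omega
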